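-- pv_equiv track=rewrite | github.com/pearllaw/Othello | othello.py | corner_closeness
-- ===== SOURCE A (Python) =====
-- def corner_closeness(board):
--     """Captures how many of each player's disks that are close to a corner."""
--     w = 0
--
--     for row in range(1,7):
--         if board.get((row, 0)) == 'W': w += 1
--         if board.get((row, 7)) == 'W': w += 1
--     for col in range(2,8):
--         if board.get((0, col)) == 'W': w += 1
--         if board.get((7, col)) == 'W': w += 1
--     return w
-- ===== SOURCE B (Python) =====
-- EDGES = (
--     {(r, 0) for r in range(1, 7)} | {(r, 7) for r in range(1, 7)}
--     | {(0, c) for c in range(2, 8)} | {(7, c) for c in range(2, 8)}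
-- )
--
--
-- def corner_closeness(board):
--     """Captures how many of each player's disks that are close to a corner."""
--     return sum(1 for pos, disk in board.items() if disk == 'W' and pos in EDGES)
-- ===== Notes on version B (the rewrite author's own statement) =====
-- stated objective: idiomatic
-- what changed: Instead of probing 24 fixed positions with board.get, B precomputes the fixed coordinate set EDGES once and makes a single pass over board.items(), counting entries whose value is 'W' and whose key is in EDGES; Pre_ requires distinct keys because board is a Python dict, whose association-list encoding cannot contain duplicate keys.
import Mathlib
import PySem

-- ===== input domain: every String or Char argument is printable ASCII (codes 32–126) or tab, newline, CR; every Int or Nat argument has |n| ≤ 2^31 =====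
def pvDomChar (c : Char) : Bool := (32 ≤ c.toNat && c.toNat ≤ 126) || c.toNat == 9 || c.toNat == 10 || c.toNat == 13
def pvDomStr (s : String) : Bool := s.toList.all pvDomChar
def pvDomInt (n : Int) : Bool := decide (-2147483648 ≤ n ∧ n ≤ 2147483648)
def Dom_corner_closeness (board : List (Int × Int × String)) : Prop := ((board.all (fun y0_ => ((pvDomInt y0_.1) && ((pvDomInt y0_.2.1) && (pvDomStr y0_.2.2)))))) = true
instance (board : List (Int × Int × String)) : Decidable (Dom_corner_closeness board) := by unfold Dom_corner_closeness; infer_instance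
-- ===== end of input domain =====

-- B replaces A's 24 fixed board.get probes by one pass over board.items() counting
-- White disks whose coordinate lies in the precomputed edge-position set (idiomatic rewrite).


-- ===== PORT A =====
-- board.get((r, c)): first-match lookup in the association list (exact for a Python
-- dict, whose encoding has distinct keys — enforced by Pre_ below).
def pvGetBoard (board : List (Int × Int × String)) (q : Int × Int) : Option String :=
  match board with
  | [] => none
  | e :: rest => if (e.1, e.2.1) = q then some e.2.2 else pvGetBoard rest q

def corner_closeness (board : List (Int × Int × String)) : Int :=
  let w : Int := 0
  let w := (PySem.List.pyRange 1 7 1).foldl (fun w row =>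
    let w := if pvGetBoard board (row, 0) = some "W" then w + 1 else w
    if pvGetBoard board (row, 7) = some "W" then w + 1 else w) w
  (PySem.List.pyRange 2 8 1).foldl (fun w col =>
    let w := if pvGetBoard board (0, col) = some "W" then w + 1 else w
    if pvGetBoard board (7, col) = some "W" then w + 1 else w) w

-- ===== PORT B =====
-- the fixed set EDGES of Source B, as the list of its (distinct) elements
def pvEdges : List (Int × Int) :=
  [(1, 0), (1, 7), (2, 0), (2, 7), (3, 0), (3, 7), (4, 0), (4, 7), (5, 0), (5, 7), (6, 0), (6, 7),
   (0, 2), (7, 2), (0, 3), (7, 3), (0, 4), (7, 4), (0, 5), (7, 5), (0, 6), (7, 6), (0, 7), (7, 7)]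

-- sum(1 for pos, disk in board.items() if disk == 'W' and pos in EDGES)
def corner_closeness_alt (board : List (Int × Int × String)) : Int :=
  (board.map (fun e => if e.2.2 = "W" ∧ (e.1, e.2.1) ∈ pvEdges then (1 : Int) else 0)).sum

-- ===== PRECONDITION & SPEC =====
-- Pre_ requires distinct keys: board is a Python dict, and its association-list
-- encoding cannot contain duplicate keys, so no input A actually receives is excluded.
def Pre_corner_closeness (board : List (Int × Int × String)) : Prop :=
  (board.map (fun e => (e.1, e.2.1))).Nodup
instance (board : List (Int × Int × String)) : Decidable (Pre_corner_closeness board) := by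
  unfold Pre_corner_closeness; infer_instance

def pvWitness_corner_closeness : (List (Int × Int × String)) :=
  [(1, 0, "W"), (0, 0, "B"), (7, 7, "W")]

def Spec_corner_closeness (board : List (Int × Int × String)) (out : Int) : Prop := out = corner_closeness_alt board
instance (board : List (Int × Int × String)) (out : Int) : Decidable (Spec_corner_closeness board out) := by unfold Spec_corner_closeness; infer_instance

-- ===== CLAIM (what is proved, stated in full; the proofs are below) =====
def Claim_equal_corner_closeness : Prop := ∀ (board : List (Int × Int × String)), Dom_corner_closeness board → Pre_corner_closeness board → Spec_corner_closeness board (corner_closeness board)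

-- ===== LEMMAS AND PROOFS =====

-- a key absent from the association list looks up to none
lemma pv_get_none (board : List (Int × Int × String)) (k : Int × Int)
    (h : k ∉ board.map (fun e => (e.1, e.2.1))) : pvGetBoard board k = none := by
  induction board with
  | nil => rfl
  | cons e rest ih =>
    simp only [List.map_cons, List.mem_cons, not_or] at h
    rw [pvGetBoard.eq_def]
    simp only []
    rw [if_neg (fun hh => h.1 hh.symm)]
    exact ih h.2

-- accumulate-if as addition of an indicator
lemma pv_if_add (c : Prop) [Decidable c] (w : Int) :
    (if c then w + 1 else w) = w + (if c then (1 : Int) else 0) := by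
  split_ifs <;> ring

-- point-mass sum over a duplicate-free list of positions
lemma pv_sum_if_point (P : List (Int × Int)) (hP : P.Nodup) (k : Int × Int) (a : Int)
    (f : Int × Int → Int) (h0 : f k = 0) :
    (P.map (fun q => if k = q then a else f q)).sum
      = (if k ∈ P then a else 0) + (P.map f).sum := by
  induction P with
  | nil => simp
  | cons q P' ih =>
    rcases List.nodup_cons.mp hP with ⟨hq, hP'⟩
    by_cases hk : k = q
    · subst hk
      have hnot : k ∉ P' := hq
      have : (P'.map (fun q => if k = q then a else f q)).sum = (P'.map f).sum := by
        congr 1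
        apply List.map_congr_left
        intro x hx
        have : k ≠ x := fun h => hnot (h ▸ hx)
        simp [this]
      simp [this, h0]
    · have := ih hP'
      simp [hk, this]
      ring

-- the sum of the 24 probe indicators equals B's one-pass count, for duplicate-free keys
lemma pv_key_lemma (board : List (Int × Int × String))
    (hb : (board.map (fun e => (e.1, e.2.1))).Nodup) :
    (pvEdges.map (fun q => if pvGetBoard board q = some "W" then (1 : Int) else 0)).sum
      = corner_closeness_alt board := by
  induction board with
  | nil => simp [corner_closeness_alt, pvGetBoard]
  | cons e rest ih =>
    rcases List.nodup_cons.mp hb with ⟨he, hrest⟩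
    have hget0 : pvGetBoard rest (e.1, e.2.1) = none := pv_get_none rest _ (by simpa using he)
    have hstep : ∀ q : Int × Int,
        (if pvGetBoard (e :: rest) q = some "W" then (1 : Int) else 0)
          = if (e.1, e.2.1) = q then (if e.2.2 = "W" then (1 : Int) else 0)
            else (if pvGetBoard rest q = some "W" then (1 : Int) else 0) := by
      intro q
      by_cases hq : (e.1, e.2.1) = q
      · simp [pvGetBoard, hq]
      · simp [pvGetBoard, hq]
    calc (pvEdges.map (fun q => if pvGetBoard (e :: rest) q = some "W" then (1 : Int) else 0)).sum
        = (pvEdges.map (fun q => if (e.1, e.2.1) = q then (if e.2.2 = "W" then (1 : Int) else 0)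
            else (if pvGetBoard rest q = some "W" then (1 : Int) else 0))).sum := by
          congr 1; exact List.map_congr_left (fun q _ => hstep q)
      _ = (if (e.1, e.2.1) ∈ pvEdges then (if e.2.2 = "W" then (1 : Int) else 0) else 0)
            + (pvEdges.map (fun q => if pvGetBoard rest q = some "W" then (1 : Int) else 0)).sum := by
          apply pv_sum_if_point _ (by decide)
          simp [hget0]
      _ = corner_closeness_alt (e :: rest) := by
          rw [ih hrest]
          simp only [corner_closeness_alt, List.map_cons, List.sum_cons]
          by_cases hw : e.2.2 = "W" <;> by_cases hm : (e.1, e.2.1) ∈ pvEdges <;>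
            simp [hw, hm]

-- A's two loops unfold to the sum of the 24 probe indicators (in A's probe order,
-- which is a permutation of pvEdges; only membership matters after pv_key_lemma)
lemma pv_A_eq_sum (board : List (Int × Int × String)) :
    corner_closeness board
      = (pvEdges.map (fun q => if pvGetBoard board q = some "W" then (1 : Int) else 0)).sum := by
  have h1 : PySem.List.pyRange 1 7 1 = [1, 2, 3, 4, 5, 6] := by decide
  have h2 : PySem.List.pyRange 2 8 1 = [2, 3, 4, 5, 6, 7] := by decide
  simp only [corner_closeness, h1, h2, List.foldl_cons, List.foldl_nil,
    pvEdges, List.map_cons, List.map_nil, List.sum_cons, List.sum_nil, pv_if_add]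
  ring

-- ===== VERDICT (by name: the statement is the Claim_ definition above) =====
theorem corner_closeness_spec : Claim_equal_corner_closeness := by
  intro board _ hpre
  unfold Spec_corner_closeness
  rw [pv_A_eq_sum, pv_key_lemma board hpre]
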